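-- pv_equiv track=rewrite | github.com/lizagoeva/sensor_blinding | main.py | get_mask_from_bits
-- ===== SOURCE A (Python) =====
-- def get_mask_from_bits(bits: int) -> str:
--     count = 0
--     for i in range(32 - int(bits), 32):
--         count |= (1 << i)
--     return "%d.%d.%d.%d" % (
--         (count & 0xff000000) >> 24, (count & 0xff0000) >> 16,
--         (count & 0xff00) >> 8, (count & 0xff)
--     )
-- ===== SOURCE B (Python) =====
-- def get_mask_from_bits(bits: int) -> str:
--     n = int(bits)
--     octets = []
--     for i in range(4):
--         k = min(max(n - 8 * i, 0), 8)
--         octets.append(str((0xFF << (8 - k)) & 0xFF))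
--     return ".".join(octets)
-- ===== Notes on version B (the rewrite author's own statement) =====
-- stated objective: simpler
-- what changed: Replaces the 32-iteration bit-accumulating loop plus masked shifts with a direct per-octet pass: each of the 4 octets gets min(max(bits-8*i,0),8) high bits, formatted and joined.
import Mathlib
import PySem

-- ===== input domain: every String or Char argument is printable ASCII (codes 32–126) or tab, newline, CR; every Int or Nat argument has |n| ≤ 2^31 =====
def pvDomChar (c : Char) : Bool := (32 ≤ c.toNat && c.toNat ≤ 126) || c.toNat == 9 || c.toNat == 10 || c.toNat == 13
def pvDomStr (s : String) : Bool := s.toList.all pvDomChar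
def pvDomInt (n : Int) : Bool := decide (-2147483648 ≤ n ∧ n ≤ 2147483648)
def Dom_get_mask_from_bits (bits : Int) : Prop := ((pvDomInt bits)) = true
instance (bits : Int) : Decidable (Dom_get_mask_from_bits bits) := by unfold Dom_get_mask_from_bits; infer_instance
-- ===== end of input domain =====

-- B replaces A's 32-iteration bit-accumulating loop with a direct 4-octet pass (simpler; same cost class).

-- ===== PORT A =====
-- count |= 1 << i over range(32 - bits, 32); then the four masked shifts, joined by '.'
def get_mask_from_bits (bits : Int) : String :=
  let count : Int :=
    (PySem.List.pyRange (32 - bits) 32 1).foldl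
      (fun c i => PySem.Int.bor c ((1 : Int) <<< i.toNat)) 0
  -- "%d.%d.%d.%d" % (...) rendered as the four decimal strings joined by '.'
  PySem.Str.join "."
    [ PySem.Int.toStr ((PySem.Int.band count 0xff000000) >>> 24)
    , PySem.Int.toStr ((PySem.Int.band count 0xff0000) >>> 16)
    , PySem.Int.toStr ((PySem.Int.band count 0xff00) >>> 8)
    , PySem.Int.toStr (PySem.Int.band count 0xff) ]

-- ===== PORT B =====
-- octet i has k = min(max(bits - 8*i, 0), 8) high bits set
def pvOctet (n i : Int) : Int :=
  let k := min (max (n - 8 * i) 0) 8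
  PySem.Int.band ((0xFF : Int) <<< (8 - k).toNat) 0xFF

def get_mask_from_bits_alt (bits : Int) : String :=
  PySem.Str.join "."
    ((PySem.List.pyRange 0 4 1).map (fun i => PySem.Int.toStr (pvOctet bits i)))

-- ===== PRECONDITION & SPEC =====
-- For bits > 32, Python A executes 1 << i with negative i and raises ValueError; excluded.
def Pre_get_mask_from_bits (bits : Int) : Prop := bits ≤ 32
instance (bits : Int) : Decidable (Pre_get_mask_from_bits bits) := by unfold Pre_get_mask_from_bits; infer_instance
def pvWitness_get_mask_from_bits : Int := 24

def Spec_get_mask_from_bits (bits : Int) (out : String) : Prop := out = get_mask_from_bits_alt bits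
instance (bits : Int) (out : String) : Decidable (Spec_get_mask_from_bits bits out) := by unfold Spec_get_mask_from_bits; infer_instance

-- ===== CLAIM (what is proved, stated in full; the proofs are below) =====
def Claim_equal_get_mask_from_bits : Prop := ∀ (bits : Int), Dom_get_mask_from_bits bits → Pre_get_mask_from_bits bits → Spec_get_mask_from_bits bits (get_mask_from_bits bits)

-- ===== LEMMAS AND PROOFS =====

lemma a_nonpos (bits : Int) (hb : bits ≤ 0) : get_mask_from_bits bits = "0.0.0.0" := by
  unfold get_mask_from_bits
  rw [PySem.List.pyRange_one]
  have h : (32 - (32 - bits)).toNat = 0 := by omega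
  rw [h]
  simp only [List.range_zero, List.map_nil, List.foldl_nil]
  decide

lemma pvOctet_nonpos (bits i : Int) (hb : bits ≤ 0) (hi : 0 ≤ i) : pvOctet bits i = 0 := by
  unfold pvOctet
  have h : min (max (bits - 8 * i) 0) 8 = 0 := by omega
  rw [h]
  decide

lemma b_nonpos (bits : Int) (hb : bits ≤ 0) : get_mask_from_bits_alt bits = "0.0.0.0" := by
  unfold get_mask_from_bits_alt
  have hr : PySem.List.pyRange 0 4 1 = [0, 1, 2, 3] := by decide
  rw [hr]
  simp only [List.map]
  rw [pvOctet_nonpos bits 0 hb (by omega), pvOctet_nonpos bits 1 hb (by omega),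
      pvOctet_nonpos bits 2 hb (by omega), pvOctet_nonpos bits 3 hb (by omega)]
  decide

-- ===== VERDICT (by name: the statement is the Claim_ definition above) =====
set_option maxRecDepth 10000 in
theorem get_mask_from_bits_spec : Claim_equal_get_mask_from_bits := by
  intro bits _ hpre
  unfold Spec_get_mask_from_bits
  by_cases hb : bits ≤ 0
  · rw [a_nonpos bits hb, b_nonpos bits hb]
  · have h1 : 1 ≤ bits := by omega
    have h2 : bits ≤ 32 := hpre
    interval_cases bits <;> decide
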